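-- pv_equiv track=rewrite | github.com/DRGN-DRC/Melee-Modding-Wizard | codeMods.py | beautifyHex
-- ===== SOURCE A (Python) =====
-- def beautifyHex( rawHex, blocksPerLine=2 ):
--
-- 	""" Rewrites a hex string to something more human-readable, displaying
-- 		8 bytes per line (2 blocks of 4 bytes, separated by a space). """
--
-- 	assert blocksPerLine > 0, 'Invalid blocksPerLine given to beautifyHex: ' + str( blocksPerLine )
--
-- 	code = [ rawHex[:8] ] # Start with the first block included, to prevent a check for whitespace in the loop
-- 	divisor = blocksPerLine * 8
--
-- 	for block in range( 8, len(rawHex), 8 ):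
--
-- 		if block % divisor != 0: # For blocksPerLine of 4, the modulo would be 0, 8, 16, 24, 0, 8...
-- 			code.append( ' ' + rawHex[block:block+8] )
-- 		else:
-- 			code.append( '\n' + rawHex[block:block+8] )
--
-- 	return ''.join( code ).rstrip()
-- ===== SOURCE B (Python) =====
-- def beautifyHex( rawHex, blocksPerLine=2 ):
--
-- 	""" Rewrites a hex string to something more human-readable: 8-char blocks,
-- 		blocksPerLine blocks per line, joined by spaces within a line. """
--
-- 	assert blocksPerLine > 0, 'Invalid blocksPerLine given to beautifyHex: ' + str( blocksPerLine )
--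
-- 	chunks = [ rawHex[i:i+8] for i in range(0, len(rawHex), 8) ]
-- 	lines = [ ' '.join( chunks[i:i+blocksPerLine] ) for i in range(0, len(chunks), blocksPerLine) ]
--
-- 	return '\n'.join( lines ).rstrip()
-- ===== Notes on version B (the rewrite author's own statement) =====
-- stated objective: simpler
-- what changed: Replaces A's single modulo-driven scan that interleaves separator-prefixed pieces into one accumulator with a two-level decomposition: split the string into 8-char chunks, group the chunks into lines of blocksPerLine, then space-join each line and newline-join the lines.
import Mathlib
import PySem

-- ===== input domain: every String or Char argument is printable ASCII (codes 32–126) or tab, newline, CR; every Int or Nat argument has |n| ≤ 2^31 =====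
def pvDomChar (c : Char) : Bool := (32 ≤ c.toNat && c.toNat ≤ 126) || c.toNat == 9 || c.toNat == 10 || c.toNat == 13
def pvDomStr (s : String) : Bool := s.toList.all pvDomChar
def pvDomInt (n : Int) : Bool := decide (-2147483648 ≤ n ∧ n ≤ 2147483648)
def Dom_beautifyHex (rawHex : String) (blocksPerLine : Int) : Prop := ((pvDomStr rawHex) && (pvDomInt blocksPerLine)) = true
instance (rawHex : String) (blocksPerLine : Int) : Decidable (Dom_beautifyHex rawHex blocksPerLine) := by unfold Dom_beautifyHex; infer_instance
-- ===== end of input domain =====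

-- B replaces A's single modulo-driven scan with a chunk-then-group-into-lines decomposition; same O(n) cost.

-- ===== PORT A =====
def beautifyHex (rawHex : String) (blocksPerLine : Int) : String :=
  let code : List String := [PySem.Str.slice rawHex none (some 8)]
  let divisor : Int := blocksPerLine * 8
  let code := (PySem.List.pyRange 8 (PySem.Str.len rawHex) 8).foldl
    (fun code block =>
      if PySem.Int.mod block divisor ≠ 0 then
        code ++ [" " ++ PySem.Str.slice rawHex (some block) (some (block + 8))]
      else
        code ++ ["\n" ++ PySem.Str.slice rawHex (some block) (some (block + 8))]) code
  PySem.Str.rstrip (PySem.Str.join "" code)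

-- ===== PORT B =====
def beautifyHex_alt (rawHex : String) (blocksPerLine : Int) : String :=
  let chunks : List String := (PySem.List.pyRange 0 (PySem.Str.len rawHex) 8).map
    (fun i => PySem.Str.slice rawHex (some i) (some (i + 8)))
  let lines : List String := (PySem.List.pyRange 0 (PySem.List.len chunks) blocksPerLine).map
    (fun i => PySem.Str.join " " (PySem.List.slice chunks (some i) (some (i + blocksPerLine))))
  PySem.Str.rstrip (PySem.Str.join "\n" lines)

-- ===== PRECONDITION & SPEC =====
-- Pre_ excludes only blocksPerLine ≤ 0, where A's assert raises AssertionError.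
def Pre_beautifyHex (rawHex : String) (blocksPerLine : Int) : Prop := 0 < blocksPerLine
instance (rawHex : String) (blocksPerLine : Int) : Decidable (Pre_beautifyHex rawHex blocksPerLine) := by unfold Pre_beautifyHex; infer_instance

def pvWitness_beautifyHex : String × Int := ("00112233445566778899aabb", 2)

def Spec_beautifyHex (rawHex : String) (blocksPerLine : Int) (out : String) : Prop := out = beautifyHex_alt rawHex blocksPerLine
instance (rawHex : String) (blocksPerLine : Int) (out : String) : Decidable (Spec_beautifyHex rawHex blocksPerLine out) := by unfold Spec_beautifyHex; infer_instance

-- ===== CLAIM (what is proved, stated in full; the proofs are below) =====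
def Claim_equal_beautifyHex : Prop := ∀ (rawHex : String) (blocksPerLine : Int), Dom_beautifyHex rawHex blocksPerLine → Pre_beautifyHex rawHex blocksPerLine → Spec_beautifyHex rawHex blocksPerLine (beautifyHex rawHex blocksPerLine)

-- ===== LEMMAS AND PROOFS =====

-- Proof-side model: grouping a list into blocks of w
def groupsL {α : Type} (w : ℕ) (l : List α) : List (List α) :=
  match l with
  | [] => []
  | x :: t =>
    if h : w = 0 then [] else (x :: t).take w :: groupsL w ((x :: t).drop w)
termination_by l.length
decreasing_by simp; omega

-- Proof-side model of A's separator-interleaving scan over the chunk list (index i = chunk number)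
def buildA (m : ℕ) : ℕ → List (List Char) → List Char
  | _, [] => []
  | i, c :: t => (if i % m = 0 then '\n' :: c else ' ' :: c) ++ buildA m (i + 1) t

def joinSp (l : List (List Char)) : List Char := (l.map (' ' :: ·)).flatten

def joinedA (m : ℕ) (cs : List (List Char)) : List Char :=
  match cs with
  | [] => []
  | c :: t => c ++ buildA m 1 t

theorem groupsL_nil {α : Type} (w : ℕ) : groupsL w ([] : List α) = [] := by
  rw [groupsL]

theorem groupsL_cons {α : Type} (w : ℕ) (hw : ¬ w = 0) (x : α) (t : List α) :
    groupsL w (x :: t) = (x :: t).take w :: groupsL w ((x :: t).drop w) := by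
  rw [groupsL]
  exact dif_neg hw

theorem pyRange_pos_nil {a b s : Int} (hs : 0 < s) (h : b ≤ a) :
    PySem.List.pyRange a b s = [] := by
  rw [PySem.List.pyRange_of_pos a b hs, if_neg (by omega)]
  simp

theorem pyRange_pos_cons {a b s : Int} (hs : 0 < s) (h : a < b) :
    PySem.List.pyRange a b s = a :: PySem.List.pyRange (a + s) b s := by
  rw [PySem.List.pyRange_of_pos a b hs, PySem.List.pyRange_of_pos (a + s) b hs]
  have hsz : s ≠ 0 := by omega
  have key : (b - a + s - 1) / s = (b - a - 1) / s + 1 := by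
    have := Int.add_mul_ediv_right (b - a - 1) 1 hsz
    rw [one_mul] at this
    rw [← this]; ring_nf
  have hnn : 0 ≤ (b - a - 1) / s := Int.ediv_nonneg (by omega) (by omega)
  have hn : ((b - a + s - 1) / s).toNat = ((b - a - 1) / s).toNat + 1 := by
    rw [key]; omega
  by_cases h2 : a + s < b
  · have key2 : (b - (a + s) + s - 1) / s = (b - a - 1) / s := by ring_nf
    rw [if_pos h, if_pos h2, key2, hn, List.range_succ_eq_map]
    simp only [List.map_cons, List.map_map]
    congr 1
    · simp
    · refine List.map_congr_left (fun k _ => ?_)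
      simp only [Function.comp]
      push_cast
      ring
  · have hz : (b - a - 1) / s = 0 := Int.ediv_eq_zero_of_lt (by omega) (by omega)
    rw [if_pos h, if_neg h2, hn, hz]
    simp

-- A's foldl with an if on which element to append, as a map
theorem foldl_append_ite {α β : Type} (p : α → Prop) [DecidablePred p] (f g : α → β)
    (l : List α) (acc : List β) :
    l.foldl (fun acc x => if p x then acc ++ [f x] else acc ++ [g x]) acc
      = acc ++ l.map (fun x => if p x then f x else g x) := by
  induction l generalizing acc with
  | nil => simp
  | cons x t ih => by_cases hx : p x <;> simp [hx, ih]

theorem chars_join_nil_sep (ps : List (List Char)) :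
    PySem.Chars.join [] ps = ps.flatten := by
  induction ps with
  | nil => simp [PySem.Chars.join_nil]
  | cons p t ih =>
    cases t with
    | nil => simp [PySem.Chars.join_singleton]
    | cons q r => rw [PySem.Chars.join_cons_cons]; simp_all

theorem chars_join_sp (c : List Char) (l : List (List Char)) :
    PySem.Chars.join [' '] (c :: l) = c ++ joinSp l := by
  induction l generalizing c with
  | nil => simp [PySem.Chars.join_singleton, joinSp]
  | cons q t ih =>
    rw [PySem.Chars.join_cons_cons, ih]
    simp [joinSp]

theorem slice_map {α β : Type} (f : α → β) (xs : List α) (a? b? : Option Int) :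
    (PySem.List.slice xs a? b?).map f = PySem.List.slice (xs.map f) a? b? := by
  cases a? <;> cases b? <;>
    simp [PySem.List.slice, List.map_take, List.map_drop]

-- C1: slicing along a positive-step range is grouping
theorem map_slice_groups {α : Type} (l : List α) (w : Int) (hw : 0 < w) (a : Int) (ha : 0 ≤ a) :
    (PySem.List.pyRange a (l.length : Int) w).map
        (fun i => PySem.List.slice l (some i) (some (i + w)))
      = groupsL w.toNat (l.drop a.toNat) := by
  by_cases h : (l.length : Int) ≤ a
  · rw [pyRange_pos_nil hw h, List.drop_eq_nil_of_le (by omega)]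
    simp [groupsL]
  · push_neg at h
    rw [pyRange_pos_cons hw h, List.map_cons,
        map_slice_groups l w hw (a + w) (by omega)]
    have hcons : ∃ x t, l.drop a.toNat = x :: t := by
      have : a.toNat < l.length := by omega
      cases hd : l.drop a.toNat with
      | nil => exfalso; have := List.length_drop (l := l) (i := a.toNat); rw [hd] at this; simp at this; omega
      | cons x t => exact ⟨x, t, rfl⟩
    obtain ⟨x, t, hd⟩ := hcons
    rw [PySem.List.slice_toNat l ha (by omega)]
    have h1 : (a + w).toNat - a.toNat = w.toNat := by omega
    have h2 : (a + w).toNat = a.toNat + w.toNat := by omega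
    rw [h1, h2, ← List.drop_drop, hd]
    rw [groupsL_cons w.toNat (by omega) x t, ← hd]
termination_by (l.length - a.toNat)
decreasing_by omega

-- buildA is periodic in its index
theorem buildA_period (m : ℕ) (t : List (List Char)) (i : ℕ) :
    buildA m (i + m) t = buildA m i t := by
  induction t generalizing i with
  | nil => rfl
  | cons c r ih =>
    simp only [buildA, Nat.add_mod_right]
    rw [show i + m + 1 = (i + 1) + m by omega, ih]

-- Offset form: from index m-d the next d chunks are space-joined, then the scan restarts
theorem buildA_offset (m d : ℕ) (hd : d < m) (t : List (List Char)) :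
    buildA m (m - d) t = joinSp (t.take d) ++ buildA m 0 (t.drop d) := by
  induction d generalizing t with
  | zero =>
    simp only [Nat.sub_zero, List.take_zero, List.drop_zero, joinSp, List.map_nil,
      List.flatten_nil, List.nil_append]
    have := buildA_period m t 0
    simpa using this
  | succ d ih =>
    cases t with
    | nil => simp [buildA, joinSp]
    | cons c r =>
      have h1 : ¬ (m - (d + 1)) % m = 0 := by
        have : m - (d + 1) < m := by omega
        have h2 : 1 ≤ m - (d + 1) := by omega
        rw [Nat.mod_eq_of_lt this]; omega
      simp only [buildA, if_neg h1]
      rw [show m - (d + 1) + 1 = m - d by omega, ih (by omega)]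
      simp [joinSp]

-- M: A's interleaved scan over the chunk list equals join-lines of groups
theorem joinedA_eq_join (m : ℕ) (hm : 0 < m) (cs : List (List Char)) :
    joinedA m cs = PySem.Chars.join ['\n'] ((groupsL m cs).map (PySem.Chars.join [' '])) := by
  cases cs with
  | nil => simp [joinedA, groupsL_nil, PySem.Chars.join_nil]
  | cons c t =>
    rw [groupsL_cons m (by omega) c t]
    have htake : (c :: t).take m = c :: t.take (m - 1) := by
      cases m with
      | zero => omega
      | succ k => simp
    have hdrop : (c :: t).drop m = t.drop (m - 1) := by
      cases m with
      | zero => omega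
      | succ k => simp
    have hb : buildA m 1 t = joinSp (t.take (m - 1)) ++ buildA m 0 (t.drop (m - 1)) := by
      have := buildA_offset m (m - 1) (by omega) t
      rw [show m - (m - 1) = 1 by omega] at this
      exact this
    rw [htake, hdrop]
    cases hrest : t.drop (m - 1) with
    | nil =>
      simp only [joinedA, hb, hrest, buildA, List.append_nil]
      rw [groupsL, List.map_cons, List.map_nil, PySem.Chars.join_singleton, chars_join_sp]
    | cons c' t'' =>
      have hlt : (c' :: t'').length < (c :: t).length := by
        have := List.length_drop (l := t) (i := m - 1)
        rw [hrest] at this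
        simp at this ⊢
        omega
      have ih := joinedA_eq_join m hm (c' :: t'')
      have hg : ∃ g gs, groupsL m (c' :: t'') = g :: gs :=
        ⟨_, _, groupsL_cons m (by omega) c' t''⟩
      obtain ⟨g, gs, hg⟩ := hg
      rw [hg, List.map_cons, List.map_cons, PySem.Chars.join_cons_cons, ← List.map_cons, ← hg, ← ih]
      simp only [joinedA, hb, hrest, buildA, Nat.zero_mod, if_pos rfl]
      rw [chars_join_sp]
      simp [joinedA]
termination_by cs.length
decreasing_by exact hlt

-- A's separator test, reduced to the chunk index
theorem mod_cond (bpl : Int) (hb : 0 < bpl) (i : ℕ) :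
    (PySem.Int.mod ((8 : Int) * i) (bpl * 8) ≠ 0) ↔ ¬ i % bpl.toNat = 0 := by
  have hdv : (0 : Int) ≤ bpl * 8 := by positivity
  have h1 : PySem.Int.mod ((8 : Int) * i) (bpl * 8) = ((8 : Int) * i) % (bpl * 8) := by
    show Int.fmod _ _ = _
    rw [Int.fmod_eq_emod]
    simp [hdv]
  rw [h1, show bpl * 8 = 8 * bpl by ring,
    Int.mul_emod_mul_of_pos _ _ (show (0:Int) < 8 by omega)]
  have h2 : (i : Int) % bpl = ((i % bpl.toNat : ℕ) : Int) := by
    rw [show bpl = ((bpl.toNat : ℕ) : Int) by omega]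
    push_cast
    rfl
  rw [h2]
  constructor
  · intro h h0; apply h; rw [h0]; simp
  · intro h h0; apply h; omega

-- A2: A's range-8 scan over raw chars equals buildA over the chunks of the dropped prefix
theorem a_scan_eq_buildA (l : List Char) (bpl : Int) (hb : 0 < bpl) (i : ℕ) (hi : 1 ≤ i) :
    ((PySem.List.pyRange ((8 : Int) * i) (l.length : Int) 8).map
        (fun b => (if PySem.Int.mod b (bpl * 8) ≠ 0
          then ' ' :: PySem.List.slice l (some b) (some (b + 8))
          else '\n' :: PySem.List.slice l (some b) (some (b + 8))))).flatten
      = buildA bpl.toNat i (groupsL 8 (l.drop (8 * i))) := by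
  by_cases h : (l.length : Int) ≤ (8 : Int) * i
  · rw [pyRange_pos_nil (by omega) h, List.drop_eq_nil_of_le (by omega)]
    simp [groupsL, buildA]
  · push_neg at h
    rw [pyRange_pos_cons (by omega) h, List.map_cons, List.flatten_cons]
    have hrec := a_scan_eq_buildA l bpl hb (i + 1) (by omega)
    rw [show ((8 : Int) * i + 8) = (8 : Int) * ((i + 1 : ℕ) : Int) by omega, hrec]
    have hcons : ∃ x t, l.drop (8 * i) = x :: t := by
      have : 8 * i < l.length := by omega
      cases hd : l.drop (8 * i) with
      | nil => exfalso; have := List.length_drop (l := l) (i := 8 * i); rw [hd] at this; simp at this; omega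
      | cons x t => exact ⟨x, t, rfl⟩
    obtain ⟨x, t, hd⟩ := hcons
    conv_rhs => rw [hd, groupsL_cons 8 (by omega) x t, ← hd]
    rw [buildA]
    have hsl : PySem.List.slice l (some ((8 : Int) * i)) (some ((8 : Int) * ((i + 1 : ℕ) : Int)))
        = (l.drop (8 * i)).take 8 := by
      rw [PySem.List.slice_toNat l (by positivity) (by positivity)]
      congr 1 <;> omega
    have hdd : (l.drop (8 * i)).drop 8 = l.drop (8 * (i + 1)) := by
      rw [List.drop_drop]
      congr 1
    rw [hsl, hdd]
    by_cases hc : PySem.Int.mod ((8 : Int) * i) (bpl * 8) ≠ 0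
    · rw [if_pos hc, if_neg ((mod_cond bpl hb i).mp hc)]
    · rw [if_neg hc, if_pos (by by_contra hx; exact hc ((mod_cond bpl hb i).mpr hx))]
termination_by (l.length - 8 * i)
decreasing_by omega

-- groupsL 8 absorbs A's explicit first chunk
theorem joinedA_groups8 (m : ℕ) (l : List Char) :
    l.take 8 ++ buildA m 1 (groupsL 8 (l.drop 8)) = joinedA m (groupsL 8 l) := by
  cases l with
  | nil => simp [groupsL_nil, joinedA, buildA]
  | cons x t =>
    rw [groupsL_cons 8 (by omega) x t]
    simp [joinedA]

-- ===== VERDICT (by name: the statement is the Claim_ definition above) =====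
theorem beautifyHex_spec : Claim_equal_beautifyHex := by
  intro rawHex bpl _ hpre
  have hb : 0 < bpl := hpre
  unfold Spec_beautifyHex
  simp only [beautifyHex, beautifyHex_alt]
  apply congrArg PySem.Str.rstrip
  apply String.ext
  rw [PySem.Str.toList_join, PySem.Str.toList_join]
  set l : List Char := rawHex.toList with hl
  have hlen : PySem.Str.len rawHex = (l.length : Int) := by simp [hl]
  set m : ℕ := bpl.toNat with hm
  have hm0 : 0 < m := by omega
  set CH := (PySem.List.pyRange 0 (PySem.Str.len rawHex) 8).map
    (fun i => PySem.Str.slice rawHex (some i) (some (i + 8))) with hCH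
  -- both sides cut rawHex into the same list of 8-char chunks
  have hchunks : CH.map String.toList = groupsL 8 l := by
    rw [hCH, List.map_map]
    have hfun : (String.toList ∘ fun i => PySem.Str.slice rawHex (some i) (some (i + 8)))
        = fun i => PySem.List.slice l (some i) (some (i + 8)) := by
      funext i
      simp [PySem.Str.toList_slice, hl]
    rw [hfun, hlen, map_slice_groups l 8 (by omega) 0 (by omega)]
    simp
  -- A side: foldl to map, join "" to flatten, then the scan lemma
  rw [foldl_append_ite (fun b => PySem.Int.mod b (bpl * 8) ≠ 0)
    (fun b => " " ++ PySem.Str.slice rawHex (some b) (some (b + 8)))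
    (fun b => "\n" ++ PySem.Str.slice rawHex (some b) (some (b + 8)))]
  simp only [show "".toList = ([] : List Char) from rfl,
    show "\n".toList = ['\n'] from rfl]
  rw [List.map_append, List.map_map, chars_join_nil_sep]
  have hAfun : (String.toList ∘ fun b =>
        if PySem.Int.mod b (bpl * 8) ≠ 0
        then " " ++ PySem.Str.slice rawHex (some b) (some (b + 8))
        else "\n" ++ PySem.Str.slice rawHex (some b) (some (b + 8)))
      = fun b => if PySem.Int.mod b (bpl * 8) ≠ 0
        then ' ' :: PySem.List.slice l (some b) (some (b + 8))
        else '\n' :: PySem.List.slice l (some b) (some (b + 8)) := by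
    funext b
    by_cases hc : PySem.Int.mod b (bpl * 8) = 0 <;>
      simp [hc, PySem.Str.toList_slice, hl, String.toList_append]
  rw [hAfun, hlen]
  have hc0 : (PySem.Str.slice rawHex none (some 8)).toList = l.take 8 := by
    rw [PySem.Str.toList_slice, ← hl,
      PySem.Chars.slice_eq_listSlice, PySem.List.slice_to l (show (0:Int) ≤ 8 by norm_num)]
    rfl
  simp only [List.map_cons, List.map_nil, List.flatten_append, List.flatten_cons,
    List.flatten_nil, List.append_nil, hc0]
  rw [show PySem.List.pyRange 8 ((l.length : ℕ) : Int) 8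
        = PySem.List.pyRange ((8 : Int) * ((1 : ℕ) : Int)) ((l.length : ℕ) : Int) 8 by norm_num,
    a_scan_eq_buildA l bpl hb 1 (le_refl 1)]
  rw [show (8 * 1 : ℕ) = 8 by omega, ← hm, joinedA_groups8 m l, joinedA_eq_join m hm0]
  -- B side: join " " of chunk slices is join [' '] of groups of the chunk list
  rw [List.map_map]
  have hKlen : PySem.List.len CH = (((groupsL 8 l).length : ℕ) : Int) := by
    rw [← hchunks]
    simp
  have hBfun : (String.toList ∘ fun i =>
        PySem.Str.join " " (PySem.List.slice CH (some i) (some (i + bpl))))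
      = (PySem.Chars.join [' ']) ∘ (fun i => PySem.List.slice (groupsL 8 l) (some i) (some (i + bpl))) := by
    funext i
    simp only [Function.comp, PySem.Str.toList_join, slice_map, hchunks]
    rfl
  rw [hBfun, hKlen, ← List.map_map, map_slice_groups (groupsL 8 l) bpl (by omega) 0 (by omega)]
  rw [hm]
  norm_num
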